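-- pv_equiv track=rewrite | github.com/helnadz/python_nauczyciela | napisy/porównywanie.py | porownaj_napisy
-- ===== SOURCE A (Python) =====
-- def porownaj_napisy(napis1,napis2):
--     najkrotsza = min(len(napis1), len(napis2))
--     for i in range (najkrotsza):
--         if napis1[i]<napis2[i]:
--             return -(i+1)
--         elif napis1[i] > napis2[i]:
--             return i+1
--     if len(napis1) == len(napis2):
--         return 0
--     elif len(napis1)< len(napis2):
--         return -najkrotsza
--     else:
--         return najkrotsza
-- ===== SOURCE B (Python) =====
-- def porownaj_napisy(napis1, napis2):
--     m = min(len(napis1), len(napis2))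
--     # binary search for the longest k <= m with napis1[:k] == napis2[:k]
--     lo, hi = 0, m
--     while lo < hi:
--         mid = (lo + hi + 1) // 2
--         if napis1[:mid] == napis2[:mid]:
--             lo = mid
--         else:
--             hi = mid - 1
--     p = lo
--     if p < m:
--         return -(p + 1) if napis1[p] < napis2[p] else p + 1
--     if len(napis1) == len(napis2):
--         return 0
--     return -m if len(napis1) < len(napis2) else m
-- ===== Notes on version B (the rewrite author's own statement) =====
-- stated objective: alternative
-- what changed: Replaces A's single character-by-character loop with early returns by a binary search over prefix equality (slice comparisons) that locates the first-difference position, followed by one flat conditional on that position and the lengths.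
import Mathlib
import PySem

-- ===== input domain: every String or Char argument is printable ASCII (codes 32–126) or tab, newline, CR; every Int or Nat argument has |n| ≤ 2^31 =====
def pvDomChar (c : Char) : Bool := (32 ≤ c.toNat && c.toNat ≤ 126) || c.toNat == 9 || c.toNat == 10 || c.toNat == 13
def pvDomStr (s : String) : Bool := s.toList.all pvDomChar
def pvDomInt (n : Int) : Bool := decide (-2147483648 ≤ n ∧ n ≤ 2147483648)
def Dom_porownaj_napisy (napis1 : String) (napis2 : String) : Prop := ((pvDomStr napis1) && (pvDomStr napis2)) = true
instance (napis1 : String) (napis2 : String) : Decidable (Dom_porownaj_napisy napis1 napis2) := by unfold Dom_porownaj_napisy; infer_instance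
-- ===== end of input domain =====

-- B replaces A's character loop with early returns by a binary search over prefix equality that
-- finds the first-difference position, then a flat conditional (same behaviour, different algorithm).

-- ===== PORT A =====
-- the 'for i in range(najkrotsza)' loop with its two early returns: some v = an early return, none = loop fell through
def pvALoop : List Char → List Char → Nat → Option Int
  | c1 :: r1, c2 :: r2, i =>
      if c1 < c2 then some (-((i : Int) + 1))
      else if c2 < c1 then some ((i : Int) + 1)
      else pvALoop r1 r2 (i + 1)
  | _, _, _ => none

def porownaj_napisy (napis1 : String) (napis2 : String) : Int :=
  let l1 := napis1.toList
  let l2 := napis2.toList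
  let najkrotsza := min l1.length l2.length
  match pvALoop l1 l2 0 with
  | some v => v
  | none =>
      if l1.length = l2.length then 0
      else if l1.length < l2.length then -(najkrotsza : Int)
      else (najkrotsza : Int)

-- ===== PORT B =====
-- the 'while lo < hi' binary search over slice equality napis1[:mid] == napis2[:mid]
def pvBS (l1 l2 : List Char) (lo hi : Nat) : Nat :=
  if h : lo < hi then
    let mid := (lo + hi + 1) / 2
    if l1.take mid = l2.take mid then pvBS l1 l2 mid hi
    else pvBS l1 l2 lo (mid - 1)
  else lo
termination_by hi - lo
decreasing_by
  · omega
  · omega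

def porownaj_napisy_alt (napis1 : String) (napis2 : String) : Int :=
  let l1 := napis1.toList
  let l2 := napis2.toList
  let m := min l1.length l2.length
  let p := pvBS l1 l2 0 m
  if p < m then
    if l1.getD p ' ' < l2.getD p ' ' then -((p : Int) + 1) else (p : Int) + 1
  else if l1.length = l2.length then 0
  else if l1.length < l2.length then -(m : Int)
  else (m : Int)

-- ===== PRECONDITION & SPEC =====
def Spec_porownaj_napisy (napis1 : String) (napis2 : String) (out : Int) : Prop := out = porownaj_napisy_alt napis1 napis2
instance (napis1 : String) (napis2 : String) (out : Int) : Decidable (Spec_porownaj_napisy napis1 napis2 out) := by unfold Spec_porownaj_napisy; infer_instance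

-- ===== CLAIM (what is proved, stated in full; the proofs are below) =====
def Claim_equal_porownaj_napisy : Prop := ∀ (napis1 : String) (napis2 : String), Dom_porownaj_napisy napis1 napis2 → Spec_porownaj_napisy napis1 napis2 (porownaj_napisy napis1 napis2)

-- ===== LEMMAS AND PROOFS =====

-- proof-side notion: length of the common prefix (first-difference position)
def pvPrefLen : List Char → List Char → Nat
  | c1 :: r1, c2 :: r2 => if c1 ≠ c2 then 0 else pvPrefLen r1 r2 + 1
  | _, _ => 0

theorem pvPrefLen_le (l1 : List Char) : ∀ l2 : List Char, pvPrefLen l1 l2 ≤ min l1.length l2.length := by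
  induction l1 with
  | nil => intro l2; simp [pvPrefLen]
  | cons c1 r1 ih =>
    intro l2
    cases l2 with
    | nil => simp [pvPrefLen]
    | cons c2 r2 =>
      by_cases h : c1 = c2
      · subst h; have := ih r2; simp only [pvPrefLen, ne_eq, not_true_eq_false, if_false,
          List.length_cons]; omega
      · simp [pvPrefLen, h]

-- prefix equality characterised by pvPrefLen
theorem pvTake_iff (l1 : List Char) : ∀ (l2 : List Char) (k : Nat),
    k ≤ min l1.length l2.length → ((l1.take k = l2.take k) ↔ k ≤ pvPrefLen l1 l2) := by
  induction l1 with
  | nil => intro l2 k hk; simp at hk; simp [hk]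
  | cons c1 r1 ih =>
    intro l2 k hk
    cases l2 with
    | nil => simp at hk; simp [hk]
    | cons c2 r2 =>
      cases k with
      | zero => simp
      | succ k =>
        simp only [List.length_cons] at hk
        by_cases h : c1 = c2
        · subst h
          simp only [List.take_succ_cons, List.cons.injEq, true_and, pvPrefLen, ne_eq,
            not_true_eq_false, if_false]
          rw [ih r2 k (by omega)]
          omega
        · simp [pvPrefLen, h]

-- binary-search correctness against pvPrefLen
theorem pvBS_eq (l1 l2 : List Char) : ∀ (lo hi : Nat),
    lo ≤ pvPrefLen l1 l2 → pvPrefLen l1 l2 ≤ hi → hi ≤ min l1.length l2.length →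
    pvBS l1 l2 lo hi = pvPrefLen l1 l2 := by
  intro lo hi
  induction lo, hi using pvBS.induct l1 l2 with
  | case1 lo hi h mid heq ih =>
    intro hlo hhi hm
    have hmid : mid ≤ pvPrefLen l1 l2 := by
      rw [← pvTake_iff l1 l2 mid (by simp only [mid]; omega)]; exact heq
    rw [pvBS]
    simp only [h, dif_pos, mid] at *
    rw [if_pos heq]
    exact ih hmid hhi hm
  | case2 lo hi h mid hne ih =>
    intro hlo hhi hm
    have hmid : ¬ mid ≤ pvPrefLen l1 l2 := by
      rw [← pvTake_iff l1 l2 mid (by simp only [mid]; omega)]; exact hne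
    rw [pvBS]
    simp only [h, dif_pos, mid] at *
    rw [if_neg hne]
    exact ih hlo (by omega) (by omega)
  | case3 lo hi h =>
    intro hlo hhi _
    rw [pvBS, dif_neg h]
    omega

-- A's loop characterised by the first-difference position pvPrefLen
theorem pvALoop_spec (l1 : List Char) : ∀ (l2 : List Char) (i : Nat),
    pvALoop l1 l2 i =
      (if pvPrefLen l1 l2 < min l1.length l2.length then
        some (if l1.getD (pvPrefLen l1 l2) ' ' < l2.getD (pvPrefLen l1 l2) ' '
              then -((i : Int) + (pvPrefLen l1 l2 : Int) + 1)
              else (i : Int) + (pvPrefLen l1 l2 : Int) + 1)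
      else none) := by
  induction l1 with
  | nil => intro l2 i; simp [pvALoop, pvPrefLen]
  | cons c1 r1 ih =>
    intro l2 i
    cases l2 with
    | nil => simp [pvALoop, pvPrefLen]
    | cons c2 r2 =>
      by_cases hlt : c1 < c2
      · have hne : c1 ≠ c2 := ne_of_lt hlt
        simp [pvALoop, pvPrefLen, hlt, hne, Nat.succ_min_succ]
      · by_cases hgt : c2 < c1
        · have hne : c1 ≠ c2 := (ne_of_lt hgt).symm
          simp [pvALoop, pvPrefLen, hlt, hgt, hne, Nat.succ_min_succ]
        · have heq : c1 = c2 := le_antisymm (not_lt.mp hgt) (not_lt.mp hlt)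
          subst heq
          simp only [pvALoop, if_neg hlt, pvPrefLen, ne_eq, not_true_eq_false,
            if_false, ih r2 (i + 1), List.length_cons]
          have hmin : min (r1.length + 1) (r2.length + 1) = min r1.length r2.length + 1 := by
            omega
          rw [hmin]
          by_cases h : pvPrefLen r1 r2 < min r1.length r2.length
          · simp only [h, Nat.add_lt_add_iff_right, if_true, List.getD_cons_succ]
            apply congrArg
            split <;> push_cast <;> ring
          · rw [if_neg h,
              if_neg (by omega : ¬pvPrefLen r1 r2 + 1 < min r1.length r2.length + 1)]

-- ===== VERDICT (by name: the statement is the Claim_ definition above) =====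
theorem porownaj_napisy_spec : Claim_equal_porownaj_napisy := by
  intro n1 n2 _
  have hp : pvBS n1.toList n2.toList 0 (min n1.toList.length n2.toList.length)
      = pvPrefLen n1.toList n2.toList :=
    pvBS_eq _ _ 0 _ (Nat.zero_le _) (pvPrefLen_le _ _) le_rfl
  simp only [Spec_porownaj_napisy, porownaj_napisy, porownaj_napisy_alt, pvALoop_spec, hp]
  by_cases h : pvPrefLen n1.toList n2.toList < min n1.toList.length n2.toList.length
  · rw [if_pos h, if_pos h]
    dsimp only
    split <;> push_cast <;> ring
  · rw [if_neg h, if_neg h]
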